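-- pv_equiv track=rewrite | github.com/thomaswsu/Othello | othello.py | list_check_opposite
-- ===== SOURCE A (Python) =====
-- def opposite_of(color): # return opposite color
--     if color == 'r':
--         return 'b'
--     if color == 'b':
--         return 'r'
--     return -1
--
-- def list_check_opposite(lst,color):
-- 	if lst == []:
-- 		return True
-- 	if lst[-1] == opposite_of(color):
-- 		return list_check_opposite(lst[:-1],color)
-- 	if lst[-1] == color:
-- 		return True
-- 	else:
-- 		return False
-- ===== SOURCE B (Python) =====
-- def list_check_opposite(lst, color):
--     opp = 'b' if color == 'r' else ('r' if color == 'b' else None)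
--     for x in reversed(lst):
--         if x != opp:
--             return x == color
--     return True
-- ===== Notes on version B (the rewrite author's own statement) =====
-- stated objective: simpler
-- what changed: Replaced the slice-and-recurse (lst[:-1] copied at every step) with a single backward loop over reversed(lst) that returns at the first non-opposite element.
import Mathlib
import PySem

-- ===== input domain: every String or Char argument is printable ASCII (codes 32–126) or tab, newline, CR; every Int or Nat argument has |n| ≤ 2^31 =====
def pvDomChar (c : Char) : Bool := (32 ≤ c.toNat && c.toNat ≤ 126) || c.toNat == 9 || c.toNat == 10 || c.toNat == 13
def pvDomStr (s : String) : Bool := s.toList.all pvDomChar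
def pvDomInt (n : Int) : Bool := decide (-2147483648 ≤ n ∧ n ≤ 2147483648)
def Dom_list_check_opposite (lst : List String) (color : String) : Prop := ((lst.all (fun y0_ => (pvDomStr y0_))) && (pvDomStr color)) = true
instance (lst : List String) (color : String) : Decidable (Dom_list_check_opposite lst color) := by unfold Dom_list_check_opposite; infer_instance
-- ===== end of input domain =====

-- B replaces A's slice-and-recurse with one backward pass over the reversed list (simpler, iterative, no list copies).


-- ===== PORT A =====
-- Python's opposite_of returns 'b'/'r' or the int -1; a string never equals -1,
-- so the non-string result is 'none' here and the comparison uses Option String (exact).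
def opposite_of (color : String) : Option String :=
  if color == "r" then some "b"
  else if color == "b" then some "r"
  else none

def list_check_opposite (lst : List String) (color : String) : Bool :=
  if h : lst = [] then true
  else
    -- lst[-1]; lst ≠ [] so the index is in range
    let lastE := (PySem.List.pyGet? lst (-1)).getD ""
    if some lastE == opposite_of color then
      list_check_opposite (PySem.List.slice lst none (some (-1))) color  -- lst[:-1]
    else if lastE == color then true
    else false
termination_by lst.length
decreasing_by
  rw [PySem.List.slice_to_neg_one]
  simp only [List.length_dropLast]
  have : lst.length ≠ 0 := fun h0 => h (List.length_eq_zero_iff.mp h0)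
  omega

-- ===== PORT B =====
def lcoGo (opp : Option String) (color : String) : List String → Bool
  | [] => true
  | x :: rest => if some x == opp then lcoGo opp color rest else x == color

def list_check_opposite_alt (lst : List String) (color : String) : Bool :=
  let opp : Option String :=
    if color == "r" then some "b" else if color == "b" then some "r" else none
  lcoGo opp color lst.reverse

-- ===== PRECONDITION & SPEC =====
def Spec_list_check_opposite (lst : List String) (color : String) (out : Bool) : Prop := out = list_check_opposite_alt lst color
instance (lst : List String) (color : String) (out : Bool) : Decidable (Spec_list_check_opposite lst color out) := by unfold Spec_list_check_opposite; infer_instance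

-- ===== CLAIM (what is proved, stated in full; the proofs are below) =====
def Claim_equal_list_check_opposite : Prop := ∀ (lst : List String) (color : String), Dom_list_check_opposite lst color → Spec_list_check_opposite lst color (list_check_opposite lst color)

-- ===== LEMMAS AND PROOFS =====

-- A's unfolding on a snoc: the last element decides, recursion on the front.
theorem list_check_opposite_snoc (l : List String) (x : String) (color : String) :
    list_check_opposite (l ++ [x]) color =
      if some x == opposite_of color then list_check_opposite l color
      else if x == color then true else false := by
  rw [list_check_opposite]
  simp [PySem.List.pyGet?_neg_one_append_singleton, PySem.List.slice_to_neg_one]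

theorem list_check_opposite_eq_go (lst : List String) (color : String) :
    list_check_opposite lst color = lcoGo (opposite_of color) color lst.reverse := by
  induction lst using List.reverseRecOn with
  | nil => rw [list_check_opposite]; simp [lcoGo]
  | append_singleton l x ih =>
    rw [list_check_opposite_snoc]
    simp only [List.reverse_append, List.reverse_cons, List.reverse_nil, List.nil_append,
      List.cons_append, lcoGo]
    by_cases h : some x = opposite_of color
    · simp [h, ih]
    · simp [h]
      by_cases hc : x = color <;> simp [hc]

-- ===== VERDICT (by name: the statement is the Claim_ definition above) =====
theorem list_check_opposite_spec : Claim_equal_list_check_opposite := by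
  intro lst color _
  unfold Spec_list_check_opposite list_check_opposite_alt
  simpa [opposite_of] using list_check_opposite_eq_go lst color
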